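-- pv_equiv track=rewrite | github.com/Vulwsztyn/PTSZ | weryfikator.py | algorytm
-- ===== SOURCE A (Python) =====
-- import math
--
-- machineCount = 4
--
-- def algorytm(size):
--     list=[[],[],[],[]]
--     g = math.ceil(size/machineCount)
--     for m in range(4):
--       for i in range(1,g+1):
--           if(i+m*g>size):
--             break
--           list[m].append(i+m*g)
--     # for i in list:
--     #   print (i)
--     return (0,list)
-- ===== SOURCE B (Python) =====
-- import math
--
-- def algorytm(size):
--     g = math.ceil(size / 4)
--     lst = [[], [], [], []]
--     for n in range(1, size + 1):
--         lst[(n - 1) // g].append(n)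
--     return (0, lst)
-- ===== Notes on version B (the rewrite author's own statement) =====
-- stated objective: simpler
-- what changed: Replaces A's nested machine-outer/offset-inner loops with a break by a single flat pass over 1..size that computes each number's destination bucket (n-1)//g directly.
import Mathlib
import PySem

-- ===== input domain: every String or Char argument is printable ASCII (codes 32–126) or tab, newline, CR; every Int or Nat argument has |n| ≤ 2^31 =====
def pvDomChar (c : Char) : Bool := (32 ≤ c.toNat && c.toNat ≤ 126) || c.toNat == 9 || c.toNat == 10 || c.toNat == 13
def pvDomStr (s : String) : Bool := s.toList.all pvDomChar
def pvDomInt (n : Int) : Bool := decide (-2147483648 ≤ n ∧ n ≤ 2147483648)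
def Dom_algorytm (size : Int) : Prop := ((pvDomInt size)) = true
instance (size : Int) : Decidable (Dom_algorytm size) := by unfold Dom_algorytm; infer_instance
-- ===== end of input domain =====

-- B replaces A's nested machine-outer/offset-inner loops (with a break) by one flat
-- pass over 1..size that sends each n straight to bucket (n-1)//g; same cost, simpler.

-- ===== PORT A =====
-- inner loop 'for i in range(1, g+1): if i+m*g > size: break; list[m].append(i+m*g)'
def innerA (size mg : Int) : List Int → List Int → List Int
  | [], bucket => bucket
  | i :: rest, bucket =>
      if i + mg > size then bucket else innerA size mg rest (bucket ++ [i + mg])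

-- outer loop 'for m in range(4)', mutating list[m] in place
def buildA (size g : Int) : List (List Int) :=
  (PySem.List.pyRange 0 4).foldl
    (fun acc m => acc.modify m.toNat (fun bucket => innerA size (m * g) (PySem.List.pyRange 1 (g + 1)) bucket))
    [[], [], [], []]

def algorytm (size : Int) : Int × List (List Int) :=
  -- g = math.ceil(size/4): exact integer form; size/4 is exact in binary float for |size| ≤ 2^31
  (0, buildA size (PySem.Int.floordiv (size + 3) 4))

-- ===== PORT B =====
-- single pass: for n in range(1, size+1): lst[(n-1)//g].append(n)
def buildB (size g : Int) : List (List Int) :=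
  (PySem.List.pyRange 1 (size + 1)).foldl
    (fun acc n => acc.modify (PySem.Int.floordiv (n - 1) g).toNat (fun b => b ++ [n]))
    [[], [], [], []]

def algorytm_alt (size : Int) : Int × List (List Int) :=
  (0, buildB size (PySem.Int.floordiv (size + 3) 4))

-- ===== PRECONDITION & SPEC =====
def Spec_algorytm (size : Int) (out : Int × List (List Int)) : Prop := out = algorytm_alt size
instance (size : Int) (out : Int × List (List Int)) : Decidable (Spec_algorytm size out) := by unfold Spec_algorytm; infer_instance

-- ===== CLAIM (what is proved, stated in full; the proofs are below) =====
def Claim_equal_algorytm : Prop := ∀ (size : Int), Dom_algorytm size → Spec_algorytm size (algorytm size)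

-- ===== LEMMAS AND PROOFS =====

-- the contiguous chunk of machine m, up to number hi
def seg (g m hi : Int) : List Int :=
  PySem.List.pyRange (1 + m * g) (min (g + m * g) hi + 1)

-- A's inner loop over range(a, g+1) produces the tail of machine-m's chunk
lemma innerA_eq (size g mg : Int) :
    ∀ (n : Nat) (a : Int) (bucket : List Int), (g + 1 - a).toNat = n →
      innerA size mg (PySem.List.pyRange a (g + 1)) bucket
        = bucket ++ PySem.List.pyRange (a + mg) (min (g + mg) size + 1) := by
  intro n
  induction n with
  | zero =>
      intro a bucket hn
      have ha : g + 1 ≤ a := by omega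
      rw [PySem.List.pyRange_one_eq_nil ha, PySem.List.pyRange_one_eq_nil (by
        have := min_le_left (g + mg) size; linarith)]
      simp [innerA]
  | succ n ih =>
      intro a bucket hn
      have ha : a < g + 1 := by omega
      rw [PySem.List.pyRange_one_cons ha]
      by_cases hb : a + mg > size
      · rw [show PySem.List.pyRange (a + mg) (min (g + mg) size + 1) = [] from
          PySem.List.pyRange_one_eq_nil (by
            have := min_le_right (g + mg) size; linarith)]
        simp [innerA, hb]
      · rw [not_lt] at hb
        have hrec := ih (a + 1) (bucket ++ [a + mg]) (by omega)
        simp only [innerA, if_neg (by omega : ¬ a + mg > size)]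
        have hlt : a + mg < min (g + mg) size + 1 := by
          have h1 : a + mg ≤ g + mg := by omega
          have := le_min h1 hb
          omega
        rw [hrec, PySem.List.pyRange_one_cons hlt,
            (by ring : a + mg + 1 = a + 1 + mg),
            List.append_assoc, List.singleton_append]

lemma innerA_full (size g mg : Int) (bucket : List Int) :
    innerA size mg (PySem.List.pyRange 1 (g + 1)) bucket
      = bucket ++ PySem.List.pyRange (1 + mg) (min (g + mg) size + 1) :=
  innerA_eq size g mg (g + 1 - 1).toNat 1 bucket rfl

lemma buildA_eq (size g : Int) :
    buildA size g = [seg g 0 size, seg g 1 size, seg g 2 size, seg g 3 size] := by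
  have h0 := innerA_full size g (0 * g) ([] : List Int)
  have h1 := innerA_full size g (1 * g) ([] : List Int)
  have h2 := innerA_full size g (2 * g) ([] : List Int)
  have h3 := innerA_full size g (3 * g) ([] : List Int)
  calc buildA size g
      = [innerA size (0 * g) (PySem.List.pyRange 1 (g + 1)) [],
         innerA size (1 * g) (PySem.List.pyRange 1 (g + 1)) [],
         innerA size (2 * g) (PySem.List.pyRange 1 (g + 1)) [],
         innerA size (3 * g) (PySem.List.pyRange 1 (g + 1)) []] := rfl
    _ = _ := by rw [h0, h1, h2, h3]; simp [seg]

-- one scatter step appends a to the right chunk and leaves the others unchanged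
lemma seg_push (g k a : Int) (h1 : k * g ≤ a - 1) (h2 : a - 1 < g + k * g) :
    seg g k (a - 1) ++ [a] = seg g k a := by
  unfold seg
  rw [min_eq_right (by omega), min_eq_right (by omega),
      (by ring : a - 1 + 1 = a),
      PySem.List.pyRange_one_succ_right (by omega : 1 + k * g ≤ a)]

lemma seg_lo (g m a : Int) (h : g + m * g ≤ a - 1) : seg g m (a - 1) = seg g m a := by
  unfold seg
  rw [min_eq_left (by omega), min_eq_left (by omega)]

lemma seg_hi (g m a : Int) (h : a ≤ m * g) : seg g m (a - 1) = seg g m a := by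
  unfold seg
  rw [PySem.List.pyRange_one_eq_nil (by have := min_le_right (g + m * g) (a - 1); omega),
      PySem.List.pyRange_one_eq_nil (by have := min_le_right (g + m * g) a; omega)]

lemma modify4_0 (x0 x1 x2 x3 : List Int) (a : Int) :
    List.modify [x0, x1, x2, x3] ((0 : Int).toNat) (fun b => b ++ [a]) = [x0 ++ [a], x1, x2, x3] := rfl
lemma modify4_1 (x0 x1 x2 x3 : List Int) (a : Int) :
    List.modify [x0, x1, x2, x3] ((1 : Int).toNat) (fun b => b ++ [a]) = [x0, x1 ++ [a], x2, x3] := rfl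
lemma modify4_2 (x0 x1 x2 x3 : List Int) (a : Int) :
    List.modify [x0, x1, x2, x3] ((2 : Int).toNat) (fun b => b ++ [a]) = [x0, x1, x2 ++ [a], x3] := rfl
lemma modify4_3 (x0 x1 x2 x3 : List Int) (a : Int) :
    List.modify [x0, x1, x2, x3] ((3 : Int).toNat) (fun b => b ++ [a]) = [x0, x1, x2, x3 ++ [a]] := rfl

lemma step_buckets (g a : Int) (hg : 0 < g) (ha : 1 ≤ a) (h4 : a ≤ 4 * g) :
    List.modify [seg g 0 (a - 1), seg g 1 (a - 1), seg g 2 (a - 1), seg g 3 (a - 1)]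
        (PySem.Int.floordiv (a - 1) g).toNat (fun b => b ++ [a])
      = [seg g 0 a, seg g 1 a, seg g 2 a, seg g 3 a] := by
  have hk := (PySem.Int.floordiv_eq_iff_of_pos hg).mp
    (rfl : PySem.Int.floordiv (a - 1) g = PySem.Int.floordiv (a - 1) g)
  set k := PySem.Int.floordiv (a - 1) g with hkdef
  obtain ⟨hk1, hk2⟩ := hk
  have hk0 : 0 ≤ k := by nlinarith
  have hk3 : k ≤ 3 := by nlinarith
  interval_cases k
  · rw [modify4_0,
        seg_push g 0 a (by linarith) (by linarith),
        seg_hi g 1 a (by nlinarith), seg_hi g 2 a (by nlinarith), seg_hi g 3 a (by nlinarith)]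
  · rw [modify4_1,
        seg_lo g 0 a (by nlinarith), seg_push g 1 a (by linarith) (by linarith),
        seg_hi g 2 a (by nlinarith), seg_hi g 3 a (by nlinarith)]
  · rw [modify4_2,
        seg_lo g 0 a (by nlinarith), seg_lo g 1 a (by nlinarith),
        seg_push g 2 a (by linarith) (by linarith), seg_hi g 3 a (by nlinarith)]
  · rw [modify4_3,
        seg_lo g 0 a (by nlinarith), seg_lo g 1 a (by nlinarith),
        seg_lo g 2 a (by nlinarith), seg_push g 3 a (by linarith) (by linarith)]

lemma scatter_aux (size g : Int) (hg : 0 < g) (h4 : size ≤ 4 * g) :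
    ∀ (n : Nat) (a : Int), (size + 1 - a).toNat = n → 1 ≤ a → a ≤ size + 1 →
      (PySem.List.pyRange a (size + 1)).foldl
          (fun acc n => acc.modify (PySem.Int.floordiv (n - 1) g).toNat (fun b => b ++ [n]))
          [seg g 0 (a - 1), seg g 1 (a - 1), seg g 2 (a - 1), seg g 3 (a - 1)]
        = [seg g 0 size, seg g 1 size, seg g 2 size, seg g 3 size] := by
  intro n
  induction n with
  | zero =>
      intro a hn h1 h2
      have ha : a = size + 1 := by omega
      rw [PySem.List.pyRange_one_eq_nil (by omega)]
      subst ha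
      simp only [add_sub_cancel_right, List.foldl_nil]
  | succ n ih =>
      intro a hn h1 h2
      have ha : a < size + 1 := by omega
      rw [PySem.List.pyRange_one_cons ha]
      simp only [List.foldl_cons]
      rw [step_buckets g a hg h1 (by omega)]
      have h := ih (a + 1) (by omega) (by omega) (by omega)
      rw [add_sub_cancel_right] at h
      exact h

lemma buildB_eq (size g : Int) (hg : 0 < g) (h4 : size ≤ 4 * g) (h1 : 1 ≤ size) :
    buildB size g = [seg g 0 size, seg g 1 size, seg g 2 size, seg g 3 size] := by
  have hinit : ∀ m : Int, 0 ≤ m → seg g m 0 = [] := by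
    intro m hm
    unfold seg
    exact PySem.List.pyRange_one_eq_nil (by
      have := min_le_right (g + m * g) (0 : Int)
      nlinarith)
  have h := scatter_aux size g hg h4 (size + 1 - 1).toNat 1 rfl (by omega) (by omega)
  rw [(by norm_num : (1 : Int) - 1 = 0), hinit 0 (by norm_num), hinit 1 (by norm_num),
      hinit 2 (by norm_num), hinit 3 (by norm_num)] at h
  exact h

lemma build_eq (size : Int) :
    buildA size (PySem.Int.floordiv (size + 3) 4) = buildB size (PySem.Int.floordiv (size + 3) 4) := by
  set g := PySem.Int.floordiv (size + 3) 4 with hgdef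
  have hb := (PySem.Int.floordiv_eq_iff_of_pos (by norm_num : (0:Int) < 4)).mp hgdef.symm
  obtain ⟨hb1, hb2⟩ := hb
  rcases (by omega : size ≤ 0 ∨ 0 < size) with hs | hs
  · -- size ≤ 0: all four chunks are empty on both sides
    have hgz : g ≤ 0 := by omega
    rw [buildA_eq]
    unfold buildB
    rw [PySem.List.pyRange_one_eq_nil (by omega), List.foldl_nil]
    have hnil : ∀ m : Int, 0 ≤ m → m ≤ 3 → seg g m size = [] := by
      intro m hm hm3
      unfold seg
      exact PySem.List.pyRange_one_eq_nil (by
        have := min_le_left (g + m * g) size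
        nlinarith)
    rw [hnil 0 (by norm_num) (by norm_num), hnil 1 (by norm_num) (by norm_num),
        hnil 2 (by norm_num) (by norm_num), hnil 3 (by norm_num) (by norm_num)]
  · have hg : 0 < g := by omega
    have h4 : size ≤ 4 * g := by omega
    rw [buildA_eq, buildB_eq size g hg h4 (by omega)]

-- ===== VERDICT (by name: the statement is the Claim_ definition above) =====
theorem algorytm_spec : Claim_equal_algorytm := by
  intro size _
  unfold Spec_algorytm algorytm algorytm_alt
  rw [build_eq]
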